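-- pv_equiv track=rewrite | github.com/juliefolkerts/pp1 | 09-Test2/mock/B3.py | f
-- ===== SOURCE A (Python) =====
-- def f(c):
--     count = 0
--     cards = list(c)
--     for i in range(0,len(cards)):
--         if cards[i] == 'A' or cards[i] == 'K' or cards[i] == 'Q' or cards[i] == 'J' or cards[i] == 'T':
--             count += 10
--         else:
--             count += int(cards[i])
--     return count
-- ===== SOURCE B (Python) =====
-- FACES = {'A', 'K', 'Q', 'J', 'T'}
--
-- def f(c):
--     cards = list(c)
--     faces = sum(1 for ch in cards if ch in FACES)
--     return 10 * faces + sum(int(ch) for ch in cards if ch not in FACES)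
-- ===== Notes on version B (the rewrite author's own statement) =====
-- stated objective: alternative
-- what changed: Replaces the single index loop with one branching accumulator by two separate aggregations over the characters: a count of face cards (x10) plus a sum of int(ch) over the non-face characters.
import Mathlib
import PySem

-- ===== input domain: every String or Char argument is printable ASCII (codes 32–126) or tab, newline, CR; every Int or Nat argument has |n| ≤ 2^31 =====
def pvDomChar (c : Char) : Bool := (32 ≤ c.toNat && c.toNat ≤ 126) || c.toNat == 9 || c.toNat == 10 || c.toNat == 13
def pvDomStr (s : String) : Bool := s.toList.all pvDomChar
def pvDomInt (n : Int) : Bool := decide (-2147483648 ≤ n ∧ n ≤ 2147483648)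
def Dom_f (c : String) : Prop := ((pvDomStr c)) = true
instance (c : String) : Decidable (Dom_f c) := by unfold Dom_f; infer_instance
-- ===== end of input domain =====

-- B replaces A's single branching index loop by two aggregations (face count x10 + digit sum); alternative decomposition, same cost.

-- ===== PORT A =====
def f (c : String) : Int :=
  let cards := c.toList
  (PySem.List.pyRange 0 (PySem.List.len cards) 1).foldl
    (fun count i =>
      let ch := PySem.List.pyGetD cards i ' '
      if ch = 'A' ∨ ch = 'K' ∨ ch = 'Q' ∨ ch = 'J' ∨ ch = 'T' then count + 10
      else count + (PySem.Int.ofChars? [ch]).getD 0) 0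

-- ===== PORT B =====
def isFace (ch : Char) : Bool := ch == 'A' || ch == 'K' || ch == 'Q' || ch == 'J' || ch == 'T'

def f_alt (c : String) : Int :=
  let cards := c.toList
  10 * ((cards.countP isFace : Nat) : Int)
    + ((cards.filter (fun ch => !isFace ch)).map
        (fun ch => (PySem.Int.ofChars? [ch]).getD 0)).sum

-- ===== PRECONDITION & SPEC =====
-- Pre_f: every character is a face card or a decimal digit; on any other character
-- Python's int(cards[i]) raises ValueError, so A returns exactly on these inputs.
def Pre_f (c : String) : Prop :=
  (c.toList.all (fun ch => isFace ch || PySem.Chars.isdigit ch)) = true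
instance (c : String) : Decidable (Pre_f c) := by unfold Pre_f; infer_instance

def pvWitness_f : String := "KT7"

def Spec_f (c : String) (out : Int) : Prop := out = f_alt c
instance (c : String) (out : Int) : Decidable (Spec_f c out) := by unfold Spec_f; infer_instance

-- ===== CLAIM (what is proved, stated in full; the proofs are below) =====
def Claim_equal_f : Prop := ∀ (c : String), Dom_f c → Pre_f c → Spec_f c (f c)

-- ===== LEMMAS AND PROOFS =====
theorem foldl_split (cards : List Char) (acc : Int) :
    cards.foldl
      (fun count ch =>
        if ch = 'A' ∨ ch = 'K' ∨ ch = 'Q' ∨ ch = 'J' ∨ ch = 'T' then count + 10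
        else count + (PySem.Int.ofChars? [ch]).getD 0) acc
    = acc + 10 * ((cards.countP isFace : Nat) : Int)
        + ((cards.filter (fun ch => !isFace ch)).map
            (fun ch => (PySem.Int.ofChars? [ch]).getD 0)).sum := by
  induction cards generalizing acc with
  | nil => simp
  | cons ch tl ih =>
    by_cases h : ch = 'A' ∨ ch = 'K' ∨ ch = 'Q' ∨ ch = 'J' ∨ ch = 'T'
    · have hf : isFace ch = true := by
        unfold isFace
        rcases h with h | h | h | h | h <;> simp [h]
      simp only [List.foldl_cons, List.countP_cons, List.filter_cons, if_pos h, hf,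
        Bool.not_true]
      rw [ih]
      push_cast
      ring
    · have hf : isFace ch = false := by
        unfold isFace
        simp only [Bool.or_eq_false_iff, beq_eq_false_iff_ne, ne_eq]
        push_neg at h
        exact ⟨⟨⟨⟨h.1, h.2.1⟩, h.2.2.1⟩, h.2.2.2.1⟩, h.2.2.2.2⟩
      simp only [List.foldl_cons, List.countP_cons, List.filter_cons, if_neg h, hf,
        Bool.not_false, if_pos, List.map_cons, List.sum_cons]
      rw [ih]
      push_cast
      ring

-- ===== VERDICT (by name: the statement is the Claim_ definition above) =====
theorem f_spec : Claim_equal_f := by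
  intro c _ _
  unfold Spec_f f f_alt
  simp only [PySem.List.len_eq]
  rw [PySem.List.foldl_pyRange_zero_pyGetD' c.toList ' '
    (fun count ch =>
      if ch = 'A' ∨ ch = 'K' ∨ ch = 'Q' ∨ ch = 'J' ∨ ch = 'T' then count + 10
      else count + (PySem.Int.ofChars? [ch]).getD 0) 0]
  rw [foldl_split]
  ring
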